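-- pv_equiv track=rewrite | github.com/C2SM/icon4py | model/common/src/icon4py/model/common/decomposition/decomposer.py | _quad_depth
-- ===== SOURCE A (Python) =====
-- def _quad_depth(grid_root: int) -> int:
--     """Number of quad-tree levels in R² sub-triangles (R must be a power of 2)."""
--     r = grid_root
--     depth = 0
--     while r > 1:
--         if r % 2 != 0:
--             raise ValueError(
--                 f"Recursive diamond decomposition requires grid_root to be a "
--                 f"power of 2, got {grid_root}"
--             )
--         r //= 2
--         depth += 1
--     return depth
-- ===== SOURCE B (Python) =====
-- def _quad_depth(grid_root: int) -> int:
--     """Number of quad-tree levels in R² sub-triangles (R must be a power of 2)."""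
--     if grid_root <= 1:
--         return 0
--     d = grid_root.bit_length() - 1
--     if grid_root != 1 << d:
--         raise ValueError(
--             f"Recursive diamond decomposition requires grid_root to be a "
--             f"power of 2, got {grid_root}"
--         )
--     return d
-- ===== Notes on version B (the rewrite author's own statement) =====
-- stated objective: idiomatic
-- what changed: Replaces the iterative halving loop with a closed-form bit-level check: compare grid_root against 1 << (bit_length-1) and return bit_length()-1 as the exponent, raising the identical ValueError otherwise.
import Mathlib
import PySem

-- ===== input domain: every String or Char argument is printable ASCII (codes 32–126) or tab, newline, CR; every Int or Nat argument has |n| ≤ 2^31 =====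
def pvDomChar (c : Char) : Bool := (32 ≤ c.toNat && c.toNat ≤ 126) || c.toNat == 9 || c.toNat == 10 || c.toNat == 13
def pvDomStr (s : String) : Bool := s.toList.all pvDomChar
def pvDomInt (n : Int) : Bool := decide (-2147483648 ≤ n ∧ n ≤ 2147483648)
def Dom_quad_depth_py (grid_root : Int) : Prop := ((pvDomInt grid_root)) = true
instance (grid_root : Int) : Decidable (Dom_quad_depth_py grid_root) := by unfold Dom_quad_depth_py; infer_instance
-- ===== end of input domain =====

-- B replaces A's halving loop by a closed-form bit_length computation; equivalence proved on Pre_ (both raise the same ValueError elsewhere).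

-- ===== PORT A =====
-- the while loop of A: state (r, depth); on the `raise ValueError` branch the loop
-- stops returning the current depth (Pre_ excludes those inputs)
def quadLoopA (r depth : Int) : Int :=
  if h : 1 < r then
    if PySem.Int.mod r 2 ≠ 0 then depth   -- raise ValueError (excluded by Pre_)
    else quadLoopA (PySem.Int.floordiv r 2) (depth + 1)
  else depth
termination_by r.toNat
decreasing_by
  rw [PySem.Int.floordiv_eq_ediv_of_pos (by omega : (0:Int) < 2)]
  omega

def quad_depth_py (grid_root : Int) : Int :=
  quadLoopA grid_root 0

-- ===== PORT B =====
def quad_depth_py_alt (grid_root : Int) : Int :=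
  if grid_root ≤ 1 then 0
  else
    let d : Nat := PySem.Int.bitLength grid_root - 1
    if grid_root ≠ (1 : Int) <<< d then 0   -- raise ValueError (excluded by Pre_)
    else (d : Int)

-- ===== PRECONDITION & SPEC =====
-- Pre_ excludes exactly the inputs on which A raises ValueError (grid_root > 1 and not a
-- power of two); B raises the identical ValueError there. "grid_root is a power of two" is
-- written as the directly computable equation grid_root = 2 ^ log2 |grid_root| (no size cap:
-- every power of two satisfies it, and only powers of two do).
def Pre_quad_depth_py (grid_root : Int) : Prop :=
  grid_root ≤ 1 ∨ grid_root = 2 ^ Nat.log2 grid_root.natAbs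
instance (grid_root : Int) : Decidable (Pre_quad_depth_py grid_root) := by unfold Pre_quad_depth_py; infer_instance

def pvWitness_quad_depth_py : Int := 64

def Spec_quad_depth_py (grid_root : Int) (out : Int) : Prop := out = quad_depth_py_alt grid_root
instance (grid_root : Int) (out : Int) : Decidable (Spec_quad_depth_py grid_root out) := by unfold Spec_quad_depth_py; infer_instance

-- ===== CLAIM (what is proved, stated in full; the proofs are below) =====
def Claim_equal_quad_depth_py : Prop := ∀ (grid_root : Int), Dom_quad_depth_py grid_root → Pre_quad_depth_py grid_root → Spec_quad_depth_py grid_root (quad_depth_py grid_root)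

-- ===== LEMMAS AND PROOFS =====

theorem quadLoopA_le_one (r depth : Int) (h : r ≤ 1) : quadLoopA r depth = depth := by
  rw [quadLoopA]; simp [show ¬ (1 < r) from by omega]

theorem quadLoopA_pow (k : Nat) : ∀ depth : Int, quadLoopA ((2:Int) ^ k) depth = depth + k := by
  induction k with
  | zero => intro depth; simp [quadLoopA_le_one]
  | succ k ih =>
    intro depth
    have h2 : (1:Int) < 2 ^ (k + 1) := by
      calc (1:Int) < 2 ^ 1 := by norm_num
        _ ≤ 2 ^ (k + 1) := by exact pow_le_pow_right₀ (by norm_num) (by omega)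
    rw [quadLoopA]
    have hmod : PySem.Int.mod ((2:Int) ^ (k + 1)) 2 = 0 := by
      rw [PySem.Int.mod_eq_zero_iff_dvd]
      exact ⟨2 ^ k, by ring⟩
    have hdiv : PySem.Int.floordiv ((2:Int) ^ (k + 1)) 2 = 2 ^ k := by
      rw [PySem.Int.floordiv_eq_ediv_of_pos (by norm_num : (0:Int) < 2)]
      rw [pow_succ]
      exact Int.mul_ediv_cancel _ (by norm_num)
    simp only [h2, dite_true, hmod, hdiv, ne_eq, not_true_eq_false, if_false]
    rw [ih (depth + 1)]
    push_cast; ring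

theorem bitLength_two_pow (k : Nat) : PySem.Int.bitLength ((2:Int) ^ k) = k + 1 := by
  induction k with
  | zero =>
    simpa using PySem.Int.bitLength_natCast (m := 1) (by norm_num)
  | succ k ih =>
    have h := PySem.Int.bitLength_natCast (m := 2 ^ (k + 1)) (by positivity)
    have hhalf : (2 ^ (k + 1) : Nat) / 2 = 2 ^ k := by
      rw [pow_succ]; omega
    rw [hhalf] at h
    have hcast : (((2 ^ (k + 1) : Nat)) : Int) = (2:Int) ^ (k + 1) := by push_cast; ring
    have hcast2 : (((2 ^ k : Nat)) : Int) = (2:Int) ^ k := by push_cast; ring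
    rw [hcast, hcast2] at h
    rw [h, ih]

-- ===== VERDICT (by name: the statement is the Claim_ definition above) =====
theorem quad_depth_py_spec : Claim_equal_quad_depth_py := by
  intro g _hdom hpre
  unfold Spec_quad_depth_py quad_depth_py quad_depth_py_alt
  rcases hpre with hle | hpow
  · rw [quadLoopA_le_one g 0 hle]
    simp [hle]
  · obtain ⟨k, rfl⟩ : ∃ k : Nat, g = 2 ^ k := ⟨Nat.log2 g.natAbs, hpow⟩
    by_cases hk0 : k = 0
    · subst hk0
      simp [quadLoopA_le_one]
    · have h2 : ¬ ((2:Int) ^ k ≤ 1) := by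
        have : (2:Int) ^ 1 ≤ 2 ^ k := by exact pow_le_pow_right₀ (by norm_num) (by omega)
        simp only [pow_one] at this
        omega
      rw [quadLoopA_pow k 0]
      simp only [h2, if_false, bitLength_two_pow k, Nat.add_sub_cancel]
      have hshift : (1 : Int) <<< k = 2 ^ k := by
        rw [Int.shiftLeft_eq]; ring
      simp [hshift]
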